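-- pv_equiv track=rewrite | github.com/XixianWei/myproject | SoftwareSpecialisationAssessment.py | count_unique_consonants
-- ===== SOURCE A (Python) =====
-- def count_unique_consonants(s):
--     # Define consonants
--     consonants = set("bcdfghjklmnpqrstvwxyz")
--
--     # Convert string to lowercase
--     lower_s = s.lower()
--
--     unique_consonants = []
--
--     for ch in consonants:
--         if lower_s.count(ch) == 1:
--             unique_consonants.append(ch)
--
--     # Return the count of unique consonants
--     return len(unique_consonants)
-- ===== SOURCE B (Python) =====
-- def count_unique_consonants(s):
--     # Single left-to-right pass with two sets: chars seen exactly once so far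
--     # and chars seen two or more times.  Answer = consonants left in `once`.
--     consonants = set("bcdfghjklmnpqrstvwxyz")
--     once = set()
--     more = set()
--     for ch in s.lower():
--         if ch in more:
--             pass
--         elif ch in once:
--             once.discard(ch)
--             more.add(ch)
--         else:
--             once.add(ch)
--     return len(once & consonants)
-- ===== Notes on version B (the rewrite author's own statement) =====
-- stated objective: alternative
-- what changed: Replaces A's 21 per-consonant full-string .count scans with a single left-to-right pass maintaining two sets (seen-exactly-once / seen-twice-or-more), returning the size of the intersection of the once-set with the consonant set.
import Mathlib
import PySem

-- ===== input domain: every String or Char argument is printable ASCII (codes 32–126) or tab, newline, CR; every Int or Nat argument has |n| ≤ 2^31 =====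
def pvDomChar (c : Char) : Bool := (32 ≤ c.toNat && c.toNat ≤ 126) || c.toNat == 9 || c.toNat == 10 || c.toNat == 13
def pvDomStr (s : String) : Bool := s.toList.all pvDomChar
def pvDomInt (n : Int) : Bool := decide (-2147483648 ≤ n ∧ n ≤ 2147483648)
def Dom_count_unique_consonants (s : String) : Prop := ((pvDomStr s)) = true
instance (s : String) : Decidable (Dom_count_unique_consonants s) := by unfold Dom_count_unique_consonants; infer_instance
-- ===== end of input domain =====

-- B replaces A's 21 per-consonant full-string scans with a single left-to-right pass
-- maintaining two sets (seen exactly once / seen at least twice); no speed claim.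

-- consonants = set("bcdfghjklmnpqrstvwxyz")  (the same literal in both Pythons)
def consonantsSet : PySem.Set Char := PySem.Set.ofList "bcdfghjklmnpqrstvwxyz".toList

-- ===== PORT A =====
def count_unique_consonants (s : String) : Int :=
  let lower_s := PySem.Str.lower s
  let unique_consonants :=
    consonantsSet.foldl
      (fun acc ch => if PySem.Str.count lower_s (String.ofList [ch]) == 1 then acc ++ [ch] else acc) []
  (unique_consonants.length : Int)

-- ===== PORT B =====
-- one pass over the lowered string with state (once, more)
def cucStep (p : PySem.Set Char × PySem.Set Char) (ch : Char) :
    PySem.Set Char × PySem.Set Char :=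
  if PySem.Set.contains p.2 ch then p
  else if PySem.Set.contains p.1 ch then (PySem.Set.discard p.1 ch, PySem.Set.add p.2 ch)
  else (PySem.Set.add p.1 ch, p.2)

def count_unique_consonants_alt (s : String) : Int :=
  let st := (PySem.Str.lower s).toList.foldl cucStep (PySem.Set.empty, PySem.Set.empty)
  PySem.Set.len (PySem.Set.inter st.1 consonantsSet)

-- ===== PRECONDITION & SPEC =====
def Spec_count_unique_consonants (s : String) (out : Int) : Prop := out = count_unique_consonants_alt s
instance (s : String) (out : Int) : Decidable (Spec_count_unique_consonants s out) := by unfold Spec_count_unique_consonants; infer_instance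

-- ===== CLAIM (what is proved, stated in full; the proofs are below) =====
def Claim_equal_count_unique_consonants : Prop := ∀ (s : String), Dom_count_unique_consonants s → Spec_count_unique_consonants s (count_unique_consonants s)

-- ===== LEMMAS AND PROOFS =====

-- Python str.count with a single-character needle is the character count.
theorem count_go_singleton (c : Char) : ∀ (l : List Char) (fuel acc : Nat), l.length ≤ fuel →
    PySem.Chars.count.go [c] fuel l acc = acc + l.count c
  | [], fuel, acc, _ => by
    rw [PySem.Chars.count.go.eq_def]; cases fuel <;> simp
  | (h :: t), fuel, acc, hle => by
    cases fuel with
    | zero => simp at hle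
    | succ f =>
      rw [PySem.Chars.count.go.eq_def]
      have hf : t.length ≤ f := by simpa using hle
      rcases eq_or_ne c h with hc | hc
      · subst hc
        simp only [List.isPrefixOf, BEq.rfl, Bool.true_and, if_true, List.length_cons,
          List.length_nil, List.drop_succ_cons, List.drop_zero]
        rw [count_go_singleton c t f (acc + 1) hf]
        simp
        omega
      · have hne : ([c].isPrefixOf (h :: t)) = false := by
          simp [List.isPrefixOf, hc]
        simp only [hne, Bool.false_eq_true, if_false]
        rw [count_go_singleton c t f acc hf]
        simp [Ne.symm hc]

theorem chars_count_singleton (l : List Char) (c : Char) :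
    PySem.Chars.count l [c] = l.count c := by
  simp [PySem.Chars.count, count_go_singleton c l l.length 0 le_rfl]

-- invariant of B's single pass
def cucInv (p : List Char) (once more : PySem.Set Char) : Prop :=
  once.Nodup ∧ more.Nodup ∧
  (∀ x, x ∈ once ↔ p.count x = 1) ∧ (∀ x, x ∈ more ↔ 2 ≤ p.count x)

theorem cucInv_step (p : List Char) (once more : PySem.Set Char) (c : Char)
    (h : cucInv p once more) :
    cucInv (p ++ [c]) (cucStep (once, more) c).1 (cucStep (once, more) c).2 := by
  obtain ⟨hn1, hn2, h1, h2⟩ := h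
  have hcnt : ∀ x, (p ++ [c]).count x = p.count x + (if x = c then 1 else 0) := by
    intro x
    rcases eq_or_ne x c with rfl | hx
    · simp [List.count_append]
    · simp [List.count_append, hx, List.count_eq_zero]
  unfold cucStep
  by_cases hm : c ∈ more
  · have hmc : PySem.Set.contains more c = true := (PySem.Set.contains_iff more c).mpr hm
    simp only [hmc, if_true]
    have h2c : 2 ≤ p.count c := (h2 c).mp hm
    refine ⟨hn1, hn2, ?_, ?_⟩ <;> intro x <;> rw [hcnt]
    · rcases eq_or_ne x c with rfl | hx
      · simp only [reduceIte]
        constructor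
        · intro hx1; have := (h1 x).mp hx1; omega
        · intro hc; exfalso; omega
      · simp [hx, h1 x]
    · rcases eq_or_ne x c with rfl | hx
      · simp only [reduceIte]
        exact ⟨fun _ => by omega, fun _ => hm⟩
      · simp [hx, h2 x]
  · have hmc : PySem.Set.contains more c = false := by
      cases hb : PySem.Set.contains more c
      · rfl
      · exact absurd ((PySem.Set.contains_iff more c).mp hb) hm
    by_cases ho : c ∈ once
    · have hoc : PySem.Set.contains once c = true := (PySem.Set.contains_iff once c).mpr ho
      simp only [hmc, hoc, if_true, Bool.false_eq_true, if_false]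
      have hc1 : p.count c = 1 := (h1 c).mp ho
      refine ⟨PySem.Set.nodup_discard once c hn1, PySem.Set.nodup_add more c hn2, ?_, ?_⟩ <;>
        intro x <;> rw [hcnt]
      · rw [PySem.Set.mem_discard]
        rcases eq_or_ne x c with rfl | hx
        · simp [hc1]
        · simp [hx, h1 x]
      · rw [PySem.Set.mem_add]
        rcases eq_or_ne x c with rfl | hx
        · simp [hc1]
        · simp [hx, h2 x]
    · have hoc : PySem.Set.contains once c = false := by
        cases hb : PySem.Set.contains once c
        · rfl
        · exact absurd ((PySem.Set.contains_iff once c).mp hb) ho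
      simp only [hmc, hoc, Bool.false_eq_true, if_false]
      have hc0 : p.count c = 0 := by
        have hno : ¬ p.count c = 1 := fun h => ho ((h1 c).mpr h)
        have hnm : ¬ 2 ≤ p.count c := fun h => hm ((h2 c).mpr h)
        omega
      refine ⟨PySem.Set.nodup_add once c hn1, hn2, ?_, ?_⟩ <;> intro x <;> rw [hcnt]
      · rw [PySem.Set.mem_add]
        rcases eq_or_ne x c with rfl | hx
        · simp [hc0]
        · simp [hx, h1 x]
      · rcases eq_or_ne x c with rfl | hx
        · simp [hc0, hm]
        · simp [hx, h2 x]

theorem cucInv_foldl : ∀ (l p : List Char) (once more : PySem.Set Char),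
    cucInv p once more →
    cucInv (p ++ l) (l.foldl cucStep (once, more)).1 (l.foldl cucStep (once, more)).2
  | [], p, once, more, h => by simpa using h
  | (c :: l), p, once, more, h => by
    have h' := cucInv_step p once more c h
    have := cucInv_foldl l (p ++ [c]) (cucStep (once, more) c).1 (cucStep (once, more) c).2 h'
    simpa using this

theorem main_eq (s : String) :
    count_unique_consonants s = count_unique_consonants_alt s := by
  unfold count_unique_consonants count_unique_consonants_alt
  dsimp only
  set l : List Char := (PySem.Str.lower s).toList with hl
  -- A's loop builds the filter of the consonant list
  have hA := PySem.List.foldl_append_if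
    (fun ch => PySem.Str.count (PySem.Str.lower s) (String.ofList [ch]) == 1)
    (id : Char → Char) consonantsSet []
  simp only [id_eq, List.map_id, List.nil_append] at hA
  rw [hA]
  -- B's state after the pass
  have hinv : cucInv l (l.foldl cucStep (PySem.Set.empty, PySem.Set.empty)).1
      (l.foldl cucStep (PySem.Set.empty, PySem.Set.empty)).2 := by
    have h0 : cucInv [] PySem.Set.empty PySem.Set.empty := by
      refine ⟨List.nodup_nil, List.nodup_nil, ?_, ?_⟩ <;> intro x <;> simp [PySem.Set.empty]
    simpa using cucInv_foldl l [] PySem.Set.empty PySem.Set.empty h0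
  obtain ⟨hn1, _, h1, _⟩ := hinv
  set once := (l.foldl cucStep (PySem.Set.empty, PySem.Set.empty)).1 with honce
  -- both sides are lengths of nodup lists with the same membership
  have hcnt : ∀ ch : Char, (PySem.Str.count (PySem.Str.lower s) (String.ofList [ch]) == 1)
      = (l.count ch == 1) := by
    intro ch
    rw [PySem.Str.count_eq]
    simp [chars_count_singleton, hl]
  unfold PySem.Set.len
  apply congrArg (Nat.cast : ℕ → ℤ)
  apply List.Perm.length_eq
  apply (List.perm_ext_iff_of_nodup (List.Nodup.filter _ (by decide))
    (PySem.Set.nodup_inter once consonantsSet hn1)).mpr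
  intro a
  rw [PySem.Set.mem_inter once consonantsSet a, List.mem_filter, h1 a]
  constructor
  · rintro ⟨hmem, hP⟩
    rw [hcnt a] at hP
    exact ⟨by simpa using hP, hmem⟩
  · rintro ⟨hc1, hmem⟩
    exact ⟨hmem, by rw [hcnt a]; simpa using hc1⟩

-- ===== VERDICT (by name: the statement is the Claim_ definition above) =====
theorem count_unique_consonants_spec : Claim_equal_count_unique_consonants := by
  intro s _
  exact main_eq s
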